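-- pv_equiv track=rewrite | github.com/Yvonne20/demo | src/route_processor.py | check_need_valid
-- ===== SOURCE A (Python) =====
-- def check_need_valid(route_group_set, need_ls):
--     need_set = {v for v in need_ls if v > 0}
--     for group in filter(lambda x: x > 0, route_group_set):
--         if group in need_set:
--             need_set.remove(group)
--     if need_set:
--         return False
--     return True
-- ===== SOURCE B (Python) =====
-- def check_need_valid(route_group_set, need_ls):
--     groups = {x for x in route_group_set if x > 0}
--     return all(v <= 0 or v in groups for v in need_ls)
-- ===== Notes on version B (the rewrite author's own statement) =====
-- stated objective: simpler
-- what changed: Replaces the build-need-set / remove-matching-groups / test-emptiness loop with one pass over need_ls checking each positive need against a set of positive groups (no mutation, no second set).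
import Mathlib
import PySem

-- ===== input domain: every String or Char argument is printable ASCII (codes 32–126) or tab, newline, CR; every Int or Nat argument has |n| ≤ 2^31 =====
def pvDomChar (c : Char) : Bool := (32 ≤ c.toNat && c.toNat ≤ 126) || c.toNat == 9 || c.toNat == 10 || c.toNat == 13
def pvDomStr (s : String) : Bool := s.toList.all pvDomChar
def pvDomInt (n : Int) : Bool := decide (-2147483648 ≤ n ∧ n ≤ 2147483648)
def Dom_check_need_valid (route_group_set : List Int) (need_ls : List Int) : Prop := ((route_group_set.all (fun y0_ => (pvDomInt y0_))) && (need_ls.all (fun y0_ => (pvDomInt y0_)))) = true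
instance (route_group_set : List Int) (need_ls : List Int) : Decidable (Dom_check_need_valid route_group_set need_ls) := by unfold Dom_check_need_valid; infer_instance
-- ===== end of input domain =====

-- B is a single pass over need_ls against a set of positive groups, replacing A's
-- remove-from-need-set loop and emptiness test (objective: simpler).

-- ===== PORT A =====
-- need_set = {v for v in need_ls if v > 0}; for group in filter(positive, route_group_set):
--   if group in need_set: need_set.remove(group); return not need_set
def check_need_valid (route_group_set : List Int) (need_ls : List Int) : Bool :=
  let need_set : PySem.Set Int := PySem.Set.ofList (need_ls.filter (fun v => decide (0 < v)))
  let final : PySem.Set Int :=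
    (route_group_set.filter (fun x => decide (0 < x))).foldl
      (fun s g => if PySem.Set.contains s g then (PySem.Set.remove? s g).getD s else s)
      need_set
  if final ≠ [] then false else true

-- ===== PORT B =====
def check_need_valid_alt (route_group_set : List Int) (need_ls : List Int) : Bool :=
  let groups : PySem.Set Int := PySem.Set.ofList (route_group_set.filter (fun x => decide (0 < x)))
  need_ls.all (fun v => decide (v ≤ 0) || PySem.Set.contains groups v)

-- ===== PRECONDITION & SPEC =====
def Spec_check_need_valid (route_group_set : List Int) (need_ls : List Int) (out : Bool) : Prop := out = check_need_valid_alt route_group_set need_ls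
instance (route_group_set : List Int) (need_ls : List Int) (out : Bool) : Decidable (Spec_check_need_valid route_group_set need_ls out) := by unfold Spec_check_need_valid; infer_instance

-- ===== CLAIM (what is proved, stated in full; the proofs are below) =====
def Claim_equal_check_need_valid : Prop := ∀ (route_group_set : List Int) (need_ls : List Int), Dom_check_need_valid route_group_set need_ls → Spec_check_need_valid route_group_set need_ls (check_need_valid route_group_set need_ls)

-- ===== LEMMAS AND PROOFS =====

-- membership in the result of A's removal loop
theorem mem_removal_foldl (gs : List Int) (s : PySem.Set Int) (y : Int) :
    y ∈ gs.foldl (fun s g => if PySem.Set.contains s g then (PySem.Set.remove? s g).getD s else s) s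
      ↔ y ∈ s ∧ y ∉ gs := by
  induction gs generalizing s with
  | nil => simp
  | cons g gs ih =>
    simp only [List.foldl_cons, ih, List.mem_cons]
    by_cases hg : PySem.Set.contains s g = true
    · rw [if_pos hg]
      have hmem : g ∈ s := (PySem.Set.contains_iff s g).mp hg
      rw [PySem.Set.remove?_of_mem hmem]
      simp only [Option.getD_some, PySem.Set.mem_discard]
      constructor
      · rintro ⟨⟨hy, hne⟩, hn⟩; exact ⟨hy, by rintro (rfl | h) <;> [exact hne rfl; exact hn h]⟩
      · rintro ⟨hy, hn⟩; exact ⟨⟨hy, fun h => hn (Or.inl h)⟩, fun h => hn (Or.inr h)⟩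
    · rw [if_neg hg]
      have hmem : g ∉ s := fun h => hg ((PySem.Set.contains_iff s g).mpr h)
      constructor
      · rintro ⟨hy, hn⟩; exact ⟨hy, by rintro (rfl | h) <;> [exact hmem hy; exact hn h]⟩
      · rintro ⟨hy, hn⟩; exact ⟨hy, fun h => hn (Or.inr h)⟩

-- ===== VERDICT (by name: the statement is the Claim_ definition above) =====
theorem check_need_valid_spec : Claim_equal_check_need_valid := by
  intro gs ns _
  unfold Spec_check_need_valid check_need_valid check_need_valid_alt
  simp only []
  rw [Bool.eq_iff_iff]
  constructor
  · intro h
    rw [List.all_eq_true]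
    intro v hv
    by_cases hvpos : 0 < v
    · have hA : (if (List.foldl (fun s g => if PySem.Set.contains s g then (PySem.Set.remove? s g).getD s else s) (PySem.Set.ofList (ns.filter (fun v => decide (0 < v)))) (gs.filter (fun x => decide (0 < x)))) ≠ [] then false else true) = true := h
      split at hA
      · exact absurd hA (by simp)
      · next hemp =>
        push Not at hemp
        have hnot : v ∉ List.foldl (fun s g => if PySem.Set.contains s g then (PySem.Set.remove? s g).getD s else s) (PySem.Set.ofList (ns.filter (fun v => decide (0 < v)))) (gs.filter (fun x => decide (0 < x))) := by
          rw [hemp]; simp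
        rw [mem_removal_foldl] at hnot
        push Not at hnot
        have hvin : v ∈ PySem.Set.ofList (ns.filter (fun v => decide (0 < v))) := by
          rw [PySem.Set.mem_ofList, List.mem_filter]; exact ⟨hv, by simpa⟩
        have := hnot hvin
        simp only [Bool.or_eq_true]
        right
        rw [PySem.Set.contains_iff, PySem.Set.mem_ofList]
        exact this
    · simp only [Bool.or_eq_true, decide_eq_true_eq]; left; omega
  · intro h
    rw [List.all_eq_true] at h
    have hemp : List.foldl (fun s g => if PySem.Set.contains s g then (PySem.Set.remove? s g).getD s else s) (PySem.Set.ofList (ns.filter (fun v => decide (0 < v)))) (gs.filter (fun x => decide (0 < x))) = [] := by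
      rw [List.eq_nil_iff_forall_not_mem]
      intro y hy
      rw [mem_removal_foldl] at hy
      obtain ⟨hy1, hy2⟩ := hy
      rw [PySem.Set.mem_ofList, List.mem_filter] at hy1
      obtain ⟨hyn, hypos⟩ := hy1
      have := h y hyn
      simp only [Bool.or_eq_true, decide_eq_true_eq] at this hypos
      rcases this with h1 | h1
      · omega
      · rw [PySem.Set.contains_iff, PySem.Set.mem_ofList] at h1
        exact hy2 h1
    rw [hemp]; simp
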